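-- pv_equiv track=rewrite | github.com/DShakirov/CodeWars | codewars-6-kyu-meeting.py | meeting
-- ===== SOURCE A (Python) =====
-- def meeting(s):
--     s = s.split(';')
--     ans = []
--     for person in s:
--         person = person.split(':')
--         ans.append(f'({person[1].upper()}, {person[0].upper()})')
--     ans.sort()
--     return ''.join(ans)
-- ===== SOURCE B (Python) =====
-- def meeting(s):
--     # incremental insertion sort: keep the rendered entries ordered as we parse,
--     # placing each one by hand-rolled binary search, then join at the end
--     out = []
--     for person in s.split(';'):
--         parts = person.split(':')
--         entry = '(' + parts[1].upper() + ', ' + parts[0].upper() + ')'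
--         lo, hi = 0, len(out)
--         while lo < hi:
--             mid = (lo + hi) // 2
--             if out[mid] < entry:
--                 lo = mid + 1
--             else:
--                 hi = mid
--         out.insert(lo, entry)
--     return ''.join(out)
-- ===== Notes on version B (the rewrite author's own statement) =====
-- stated objective: alternative
-- what changed: B replaces sort-at-the-end with an incremental insertion sort: each rendered entry is placed into an always-sorted list via a hand-rolled binary search, so no final sort pass exists.
import Mathlib
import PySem

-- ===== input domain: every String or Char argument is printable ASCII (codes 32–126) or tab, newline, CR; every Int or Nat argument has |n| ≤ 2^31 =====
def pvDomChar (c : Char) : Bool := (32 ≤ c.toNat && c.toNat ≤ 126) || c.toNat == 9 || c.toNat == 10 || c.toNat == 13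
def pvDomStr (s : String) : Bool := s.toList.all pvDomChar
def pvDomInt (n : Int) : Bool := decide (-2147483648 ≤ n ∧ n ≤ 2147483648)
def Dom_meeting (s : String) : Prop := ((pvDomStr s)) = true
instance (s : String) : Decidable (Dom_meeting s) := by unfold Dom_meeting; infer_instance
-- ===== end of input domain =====

-- B replaces A's sort-at-the-end with an incremental insertion sort (binary-search placement); same return value.


-- ===== PORT A =====
-- f'({person[1].upper()}, {person[0].upper()})'  (the identical rendering expression appears in both Pythons)
def pvRender (parts : List (List Char)) : List Char :=
  '(' :: (PySem.Chars.upper (PySem.List.pyGetD parts 1 []) ++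
    ',' :: ' ' :: (PySem.Chars.upper (PySem.List.pyGetD parts 0 []) ++ [')']))

def meeting (s : String) : String :=
  let parts := PySem.Chars.splitOn s.toList [';']
  let ans := parts.foldl
    (fun ans person => ans ++ [pvRender (PySem.Chars.splitOn person [':'])])
    ([] : List (List Char))
  String.ofList (PySem.Chars.join [] (PySem.List.sorted ans (fun x => x) false))

-- ===== PORT B =====
-- the `while lo < hi` binary-search loop of Source B (lo, hi are nonnegative Python ints; Nat mirrors them exactly)
def pvBfind (out : List (List Char)) (entry : List Char) (lo hi : Nat) : Nat :=
  if lo < hi then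
    let mid := (lo + hi) / 2
    if PySem.List.pyGetD out (mid : Int) [] < entry then pvBfind out entry (mid + 1) hi
    else pvBfind out entry lo mid
  else lo
termination_by hi - lo
decreasing_by all_goals omega

-- body of Source B's for-loop: render the entry, binary-search its slot, out.insert(lo, entry)
def pvBinsert (out : List (List Char)) (person : List Char) : List (List Char) :=
  let parts := PySem.Chars.splitOn person [':']
  let entry := pvRender parts
  PySem.List.insert out ((pvBfind out entry 0 out.length : Nat) : Int) entry

def meeting_alt (s : String) : String :=
  let out := (PySem.Chars.splitOn s.toList [';']).foldl pvBinsert []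
  String.ofList (PySem.Chars.join [] out)

-- ===== PRECONDITION & SPEC =====
-- Pre_ excludes exactly the inputs where A raises IndexError: some semicolon-separated segment contains no colon (person[1] missing).
def Pre_meeting (s : String) : Prop :=
  ∀ p ∈ PySem.Chars.splitOn s.toList [';'], 2 ≤ (PySem.Chars.splitOn p [':']).length
instance (s : String) : Decidable (Pre_meeting s) := by unfold Pre_meeting; infer_instance

def pvWitness_meeting : String := "fred:corwill;wilfred:corwill"

def Spec_meeting (s : String) (out : String) : Prop := out = meeting_alt s
instance (s : String) (out : String) : Decidable (Spec_meeting s out) := by unfold Spec_meeting; infer_instance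

-- ===== CLAIM (what is proved, stated in full; the proofs are below) =====
def Claim_equal_meeting : Prop := ∀ (s : String), Dom_meeting s → Pre_meeting s → Spec_meeting s (meeting s)

-- ===== LEMMAS AND PROOFS =====

-- the binary search finds the boundary of a sorted list: everything before the result is < entry, nothing from it on is
lemma pvBfind_spec (l : List (List Char)) (e : List Char) (hs : l.Pairwise (· ≤ ·)) :
    ∀ (fuel lo hi : Nat), hi - lo ≤ fuel → lo ≤ hi → hi ≤ l.length →
    (∀ i (h : i < l.length), i < lo → l[i] < e) →
    (∀ i (h : i < l.length), hi ≤ i → ¬ l[i] < e) →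
    pvBfind l e lo hi ≤ l.length ∧
    (∀ i (h : i < l.length), i < pvBfind l e lo hi → l[i] < e) ∧
    (∀ i (h : i < l.length), pvBfind l e lo hi ≤ i → ¬ l[i] < e) := by
  intro fuel
  induction fuel with
  | zero =>
    intro lo hi hf hlh hhl h1 h2
    have hn : ¬ lo < hi := by omega
    rw [pvBfind, if_neg hn]
    exact ⟨by omega, fun i h hi => h1 i h (by omega), fun i h hi => h2 i h (by omega)⟩
  | succ n ih =>
    intro lo hi hf hlh hhl h1 h2
    by_cases hlt : lo < hi
    · have hmlen : (lo + hi) / 2 < l.length := by omega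
      have hget : PySem.List.pyGetD l (((lo + hi) / 2 : Nat) : Int) [] = l[(lo + hi) / 2] := by
        rw [PySem.List.pyGetD_natCast, List.getD_eq_getElem _ _ hmlen]
      rw [pvBfind, if_pos hlt]
      simp only [hget]
      have hmono : ∀ i j (hj : j < l.length) (hij : i ≤ j), l[i]'(by omega) ≤ l[j] := by
        intro i j hj hij
        rcases Nat.lt_or_ge i j with hij' | hij'
        · exact (List.pairwise_iff_getElem.mp hs) i j (by omega) hj hij'
        · have : i = j := by omega
          subst this; exact le_rfl
      by_cases hc : l[(lo + hi) / 2] < e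
      · rw [if_pos hc]
        refine ih ((lo + hi) / 2 + 1) hi (by omega) (by omega) hhl ?_ h2
        intro i h hi'
        rcases Nat.lt_or_ge i lo with hlo' | hlo'
        · exact h1 i h hlo'
        · exact lt_of_le_of_lt (hmono i ((lo + hi) / 2) hmlen (by omega)) hc
      · rw [if_neg hc]
        refine ih lo ((lo + hi) / 2) (by omega) (by omega) (by omega) h1 ?_
        intro i h hi' hlt'
        exact hc (lt_of_le_of_lt (hmono ((lo + hi) / 2) i h hi') hlt')
    · rw [pvBfind, if_neg hlt]
      exact ⟨by omega, fun i h hi => h1 i h (by omega), fun i h hi => h2 i h (by omega)⟩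

-- the boundary description pins takeWhile/dropWhile of the orderedInsert predicate to take/drop at that index
lemma pvTakeDrop (e : List Char) :
    ∀ (l : List (List Char)) (r : Nat), r ≤ l.length →
    (∀ i (h : i < l.length), i < r → l[i] < e) →
    (∀ i (h : i < l.length), r ≤ i → ¬ l[i] < e) →
    l.takeWhile (fun b => decide ¬ e ≤ b) = l.take r ∧
    l.dropWhile (fun b => decide ¬ e ≤ b) = l.drop r := by
  intro l
  induction l with
  | nil => intro r hr _ _; simp at hr; subst hr; simp
  | cons x xs ih =>
    intro r hr h1 h2
    cases r with
    | zero =>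
      have hx : ¬ x < e := h2 0 (by simp) (by omega)
      rw [List.takeWhile_cons_of_neg (by simpa using le_of_not_gt hx),
        List.dropWhile_cons_of_neg (by simpa using le_of_not_gt hx)]
      simp
    | succ r' =>
      have hx : x < e := h1 0 (by simp) (by omega)
      obtain ⟨ht, hd⟩ := ih r' (by simpa using hr)
        (fun i h hi => by simpa using h1 (i + 1) (by simpa using h) (by omega))
        (fun i h hi => by simpa using h2 (i + 1) (by simpa using h) (by omega))
      rw [List.takeWhile_cons_of_pos (by simpa using not_le.mpr hx),
        List.dropWhile_cons_of_pos (by simpa using not_le.mpr hx), ht, hd]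
      simp

-- one loop body of B keeps the accumulator sorted and adds exactly the rendered entry
lemma pvBinsert_sorted_perm (acc : List (List Char)) (person : List Char)
    (hs : acc.Pairwise (· ≤ ·)) :
    (pvBinsert acc person).Pairwise (· ≤ ·) ∧
    (pvBinsert acc person).Perm (pvRender (PySem.Chars.splitOn person [':']) :: acc) := by
  have hspec := pvBfind_spec acc (pvRender (PySem.Chars.splitOn person [':'])) hs
    acc.length 0 acc.length (by omega) (by omega) le_rfl
    (fun i h hi => by omega) (fun i h hi => by omega)
  obtain ⟨hr, h1, h2⟩ := hspec
  have heq : pvBinsert acc person =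
      List.orderedInsert (· ≤ ·) (pvRender (PySem.Chars.splitOn person [':'])) acc := by
    show PySem.List.insert acc _ _ = _
    rw [PySem.List.insert_natCast _ _ _ hr, List.orderedInsert_eq_take_drop]
    obtain ⟨ht, hd⟩ := pvTakeDrop (pvRender (PySem.Chars.splitOn person [':'])) acc
      (pvBfind acc (pvRender (PySem.Chars.splitOn person [':'])) 0 acc.length) hr h1 h2
    rw [ht, hd]
  rw [heq]
  exact ⟨List.Pairwise.orderedInsert _ _ hs, List.perm_orderedInsert _ _ _⟩

-- the Decidable instance inferred in the port of A agrees with the LinearOrder one the library lemmas use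
lemma pvSorted_inst (xs : List (List Char)) :
    @PySem.List.sorted (List Char) (List Char) List.instLT (fun a b => a.decidableLT b)
      xs (fun x => x) false =
    @PySem.List.sorted (List Char) (List Char) LinearOrder.toPartialOrder.toLT
      LinearOrder.toDecidableLT xs (fun x => x) false := by
  have h : (fun (a b : List Char) => a.decidableLT b) =
      (LinearOrder.toDecidableLT : DecidableLT (List Char)) := Subsingleton.elim _ _
  rw [h]

-- B's whole loop: sorted accumulator, permutation of the rendered entries
lemma pvFoldl_binsert (ps : List (List Char)) :
    ∀ acc, acc.Pairwise (· ≤ ·) →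
    (ps.foldl pvBinsert acc).Pairwise (· ≤ ·) ∧
    (ps.foldl pvBinsert acc).Perm
      (acc ++ ps.map (fun p => pvRender (PySem.Chars.splitOn p [':']))) := by
  induction ps with
  | nil => intro acc hacc; refine ⟨hacc, ?_⟩; simp
  | cons p ps ih =>
    intro acc hacc
    obtain ⟨hS, hP⟩ := pvBinsert_sorted_perm acc p hacc
    obtain ⟨hS', hP'⟩ := ih _ hS
    refine ⟨hS', ?_⟩
    simp only [List.map_cons]
    exact hP'.trans ((hP.append_right _).trans List.perm_middle.symm)

-- ===== VERDICT (by name: the statement is the Claim_ definition above) =====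
theorem meeting_spec : Claim_equal_meeting := by
  intro s _ _
  show meeting s = meeting_alt s
  simp only [meeting, meeting_alt]
  obtain ⟨hS, hP⟩ := pvFoldl_binsert (PySem.Chars.splitOn s.toList [';']) [] (by simp)
  have hA : (PySem.Chars.splitOn s.toList [';']).foldl
      (fun ans person => ans ++ [pvRender (PySem.Chars.splitOn person [':'])])
      ([] : List (List Char)) =
      (PySem.Chars.splitOn s.toList [';']).map
        (fun p => pvRender (PySem.Chars.splitOn p [':'])) := by
    simpa using PySem.List.foldl_append_singleton_eq_map
      (fun p => pvRender (PySem.Chars.splitOn p [':'])) (PySem.Chars.splitOn s.toList [';']) []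
  rw [hA]
  have hkey : PySem.List.sorted
      ((PySem.Chars.splitOn s.toList [';']).map (fun p => pvRender (PySem.Chars.splitOn p [':'])))
      (fun x => x) false =
      (PySem.Chars.splitOn s.toList [';']).foldl pvBinsert [] := by
    rw [pvSorted_inst]
    have hP' : ((PySem.Chars.splitOn s.toList [';']).foldl pvBinsert []).Perm
        ((PySem.Chars.splitOn s.toList [';']).map
          (fun p => pvRender (PySem.Chars.splitOn p [':']))) := by simpa using hP
    exact List.Perm.eq_of_pairwise (le := fun (a b : List Char) => a ≤ b)
      (fun a b _ _ hab hba => le_antisymm hab hba)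
      (PySem.List.sorted_pairwise _ _) hS
      ((@PySem.List.sorted_perm (List Char) (List Char) LinearOrder.toPartialOrder.toLT LinearOrder.toDecidableLT _ _ _).trans hP'.symm)
  rw [hkey]
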